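-- pv_equiv track=rewrite | github.com/watt-tang/clawguard | provloom/app/runtime/skill_parser.py | _extract_first_paragraph
-- ===== SOURCE A (Python) =====
-- def _extract_first_paragraph(text: str) -> str:
--     lines = []
--     for raw_line in text.splitlines():
--         line = raw_line.strip()
--         if line.startswith("#"):
--             continue
--         if not line:
--             if lines:
--                 break
--             continue
--         lines.append(line)
--     return " ".join(lines)
-- ===== SOURCE B (Python) =====
-- def _extract_first_paragraph(text: str) -> str:
--     # filter first: stripped lines with comment lines removed, blanks kept
--     lines = [s for s in (l.strip() for l in text.splitlines()) if not s.startswith("#")]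
--     # drop leading blanks
--     while lines and not lines[0]:
--         lines = lines[1:]
--     # take the first run of non-blank lines
--     para = []
--     for s in lines:
--         if not s:
--             break
--         para.append(s)
--     return " ".join(para)
-- ===== Notes on version B (the rewrite author's own statement) =====
-- stated objective: alternative
-- what changed: Replaces A's single-pass accumulate-until-blank state machine by a filter-then-segment shape: first build the stripped, comment-free line list, then drop the leading blank run and take the first non-blank run.
import Mathlib
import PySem

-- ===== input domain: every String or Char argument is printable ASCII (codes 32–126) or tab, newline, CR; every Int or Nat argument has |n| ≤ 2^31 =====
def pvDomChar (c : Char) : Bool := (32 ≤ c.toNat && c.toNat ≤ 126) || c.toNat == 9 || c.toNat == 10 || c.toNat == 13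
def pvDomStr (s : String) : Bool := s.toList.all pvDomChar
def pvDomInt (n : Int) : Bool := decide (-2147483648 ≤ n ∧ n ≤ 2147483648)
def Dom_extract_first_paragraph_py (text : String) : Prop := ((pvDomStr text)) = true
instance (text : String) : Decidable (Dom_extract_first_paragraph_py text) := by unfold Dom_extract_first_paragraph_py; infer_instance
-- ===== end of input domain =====

-- B replaces A's accumulate-until-blank state machine by filter / drop leading blanks / take first run (alternative decomposition, same cost).

-- ===== PORT A =====
def pvALoop (lines : List String) : List String → List String
  | [] => lines
  | raw :: rest =>
    let line := PySem.Str.strip raw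
    if PySem.Str.startswith line "#" then pvALoop lines rest
    else if line == "" then
      (if lines.isEmpty then pvALoop lines rest else lines)
    else pvALoop (lines ++ [line]) rest

def extract_first_paragraph_py (text : String) : String :=
  PySem.Str.join " " (pvALoop [] (PySem.Str.splitlines text))

-- ===== PORT B =====
def extract_first_paragraph_py_alt (text : String) : String :=
  let lines := (((PySem.Str.splitlines text).map PySem.Str.strip).filter
      (fun s => !(PySem.Str.startswith s "#")))
  let rest := lines.dropWhile (fun s => s == "")
  let para := rest.takeWhile (fun s => s != "")
  PySem.Str.join " " para

-- ===== PRECONDITION & SPEC =====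
def Spec_extract_first_paragraph_py (text : String) (out : String) : Prop := out = extract_first_paragraph_py_alt text
instance (text : String) (out : String) : Decidable (Spec_extract_first_paragraph_py text out) := by unfold Spec_extract_first_paragraph_py; infer_instance

-- ===== CLAIM (what is proved, stated in full; the proofs are below) =====
def Claim_equal_extract_first_paragraph_py : Prop := ∀ (text : String), Dom_extract_first_paragraph_py text → Spec_extract_first_paragraph_py text (extract_first_paragraph_py text)

-- ===== LEMMAS AND PROOFS =====
def pvFlt (ls : List String) : List String :=
  (ls.map PySem.Str.strip).filter (fun s => !(PySem.Str.startswith s "#"))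

lemma pvALoop_nonempty (ls : List String) :
    ∀ acc : List String, acc ≠ [] →
      pvALoop acc ls = acc ++ (pvFlt ls).takeWhile (fun s => s != "") := by
  induction ls with
  | nil => intro acc _; simp [pvALoop, pvFlt]
  | cons raw rest ih =>
    intro acc hacc
    simp only [pvALoop, pvFlt, List.map_cons, List.filter_cons]
    by_cases hc : PySem.Chars.startswith (PySem.Chars.strip raw.toList) ['#'] = true
    · simpa [hc, pvFlt] using ih acc hacc
    · by_cases hb : PySem.Str.strip raw = ""
      · simp [hb, List.isEmpty_iff, hacc, PySem.Chars.startswith]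
      · have := ih (acc ++ [PySem.Str.strip raw]) (by simp)
        simp [hc, hb, pvFlt] at this ⊢
        simp [this]

lemma pvALoop_empty (ls : List String) :
    pvALoop [] ls =
      ((pvFlt ls).dropWhile (fun s => s == "")).takeWhile (fun s => s != "") := by
  induction ls with
  | nil => simp [pvALoop, pvFlt]
  | cons raw rest ih =>
    simp only [pvALoop, pvFlt, List.map_cons, List.filter_cons]
    by_cases hc : PySem.Chars.startswith (PySem.Chars.strip raw.toList) ['#'] = true
    · simpa [hc, pvFlt] using ih
    · by_cases hb : PySem.Str.strip raw = ""
      · simpa [hc, hb, List.isEmpty_iff, List.dropWhile, pvFlt] using ih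
      · have := pvALoop_nonempty rest [PySem.Str.strip raw] (by simp)
        simp [hc, hb, pvFlt] at this ⊢
        simp [this]

-- ===== VERDICT (by name: the statement is the Claim_ definition above) =====
theorem extract_first_paragraph_py_spec : Claim_equal_extract_first_paragraph_py := by
  intro text _
  unfold Spec_extract_first_paragraph_py extract_first_paragraph_py extract_first_paragraph_py_alt
  rw [pvALoop_empty]
  rfl
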